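-- pv_equiv track=rewrite | github.com/satvikvedala/GFG-solutions | Strings/esign a tiny URL or URL shortener.py | idToShortURL
-- ===== SOURCE A (Python) =====
-- def idToShortURL(n):
-- 	# code here
-- 	dic = {}
-- 	k = 0
-- 	for i in range(26):
-- 	    dic[i] = chr(97+i)
-- 	k+=i+1
-- 	for i in range(26):
-- 	    dic[k+i] = chr(65+i)
-- 	k+=i+1
-- 	for i in range(10):
-- 	    dic[k+i] = str(i)
-- 	st = ''
-- 	while(n>=62):
-- 	    rem = n%62
-- 	    st = st+dic[rem]
-- 	    n = n//62
-- 	st = st+dic[n]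
-- 	st = st[::-1]
-- 	return st
-- ===== SOURCE B (Python) =====
-- def idToShortURL(n):
--     # Build the same digit->character map (dict lookup keeps KeyError for negative n).
--     dic = {i: chr(97 + i) for i in range(26)}
--     dic.update({26 + i: chr(65 + i) for i in range(26)})
--     dic.update({52 + i: str(i) for i in range(10)})
--     if n == 0:
--         return 'a'
--     # Largest power of 62 not exceeding n.
--     p = 1
--     while p * 62 <= n:
--         p *= 62
--     # Emit digits most-significant-first: no reversal needed.
--     st = ''
--     while p > 0:
--         st = st + dic[n // p]
--         n = n % p
--         p = p // 62
--     return st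
-- ===== Notes on version B (the rewrite author's own statement) =====
-- stated objective: alternative
-- what changed: B replaces A's least-significant-first remainder loop followed by a string reversal with a power-descent pass: it finds the largest power of 62 not exceeding n and emits digits most-significant-first, so no reversal is ever built.
import Mathlib
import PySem

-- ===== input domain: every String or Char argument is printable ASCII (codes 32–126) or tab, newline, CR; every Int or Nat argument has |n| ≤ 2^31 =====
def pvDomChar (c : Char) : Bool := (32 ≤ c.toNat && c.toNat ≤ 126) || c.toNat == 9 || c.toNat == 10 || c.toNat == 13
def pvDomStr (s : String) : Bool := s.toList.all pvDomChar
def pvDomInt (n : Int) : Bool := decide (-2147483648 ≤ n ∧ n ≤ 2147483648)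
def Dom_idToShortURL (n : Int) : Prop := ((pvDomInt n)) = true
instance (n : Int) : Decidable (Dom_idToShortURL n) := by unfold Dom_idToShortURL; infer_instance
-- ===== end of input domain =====

-- B emits base-62 digits most-significant-first via a power-of-62 descent (no reversal),
-- where A collects remainders least-significant-first and reverses; equal on all n ≥ 0
-- (both raise KeyError for n < 0, excluded by Pre_).


-- ===== PORT A =====
-- A's digit map, built exactly as A builds it: three insertion loops with the running
-- offset k (after 'for i in range(26)' the leftover i is 25, so 'k += i+1' adds 26).
-- chr(97+i)/chr(65+i) is ported as the one-character string (exact on this ASCII range).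
def dicA : PySem.Dict Int String :=
  -- k = 0; then k += i + 1 after each loop (i is 25 resp. 25 left over), so k = 26, then 52
  (PySem.List.pyRange 0 10 1).foldl
    (fun d i => d.insert (52 + i) (PySem.Int.toStr i))
    ((PySem.List.pyRange 0 26 1).foldl
      (fun d i => d.insert (26 + i) (String.ofList [Char.ofNat (65 + i).toNat]))
      ((PySem.List.pyRange 0 26 1).foldl
        (fun d i => d.insert i (String.ofList [Char.ofNat (97 + i).toNat]))
        PySem.Dict.empty))

-- dic[i]; get? = none is Python's KeyError (only reachable for n < 0, excluded by Pre_)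
def digA (i : Int) : String := (dicA.get? i).getD ""

-- while n >= 62: st = st + dic[n % 62]; n = n // 62 — then the final st + dic[n].
-- fuel only makes the recursion structural; n.toNat + 1 steps always suffice (n shrinks by // 62)
def loopA (fuel : Nat) (n : Int) (st : String) : String :=
  match fuel with
  | 0 => st
  | fuel + 1 =>
    if 62 ≤ n then
      loopA fuel (PySem.Int.floordiv n 62) (st ++ digA (PySem.Int.mod n 62))
    else st ++ digA n

def idToShortURL (n : Int) : String :=
  -- st = st[::-1]; step -1 ≠ 0, so slice? is never none
  (PySem.Str.slice? (loopA (n.toNat + 1) n "") none none (-1)).getD ""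

-- ===== PORT B =====
-- B's digit map: a dict comprehension plus two updates (same key/value pairs).
def dicB : PySem.Dict Int String :=
  ((PySem.Dict.ofList
    ((PySem.List.pyRange 0 26 1).map (fun i => (i, String.ofList [Char.ofNat (97 + i).toNat])))).update
    ((PySem.List.pyRange 0 26 1).map (fun i => (26 + i, String.ofList [Char.ofNat (65 + i).toNat])))).update
    ((PySem.List.pyRange 0 10 1).map (fun i => (52 + i, PySem.Int.toStr i)))

-- dic[i]; get? = none is Python's KeyError (only reachable for n < 0, excluded by Pre_)
def digB (i : Int) : String := (dicB.get? i).getD ""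

-- while p * 62 <= n: p *= 62.
-- fuel only makes the recursion structural; n.toNat + 1 steps always suffice (p grows by * 62)
def powB (fuel : Nat) (n p : Int) : Int :=
  match fuel with
  | 0 => p
  | fuel + 1 => if p * 62 ≤ n then powB fuel n (p * 62) else p

-- while p > 0: st = st + dic[n // p]; n = n % p; p = p // 62.
-- fuel only makes the recursion structural; p.toNat + 1 steps always suffice (p shrinks by // 62)
def loopB (fuel : Nat) (n p : Int) (st : String) : String :=
  match fuel with
  | 0 => st
  | fuel + 1 =>
    if 0 < p then
      loopB fuel (PySem.Int.mod n p) (PySem.Int.floordiv p 62) (st ++ digB (PySem.Int.floordiv n p))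
    else st

def idToShortURL_alt (n : Int) : String :=
  if n = 0 then "a"
  else loopB ((powB (n.toNat + 1) n 1).toNat + 1) n (powB (n.toNat + 1) n 1) ""

-- ===== PRECONDITION & SPEC =====
-- Pre_ excludes n < 0, where both A and B raise KeyError (dict lookup with a negative key).
def Pre_idToShortURL (n : Int) : Prop := 0 ≤ n
instance (n : Int) : Decidable (Pre_idToShortURL n) := by unfold Pre_idToShortURL; infer_instance
def pvWitness_idToShortURL : Int := (12345)

def Spec_idToShortURL (n : Int) (out : String) : Prop := out = idToShortURL_alt n
instance (n : Int) (out : String) : Decidable (Spec_idToShortURL n out) := by unfold Spec_idToShortURL; infer_instance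

-- ===== CLAIM (what is proved, stated in full; the proofs are below) =====
def Claim_equal_idToShortURL : Prop := ∀ (n : Int), Dom_idToShortURL n → Pre_idToShortURL n → Spec_idToShortURL n (idToShortURL n)

-- ===== LEMMAS AND PROOFS =====

-- The two digit maps coincide: dict comprehension + update is the same insert fold.
lemma dicB_eq_dicA : dicB = dicA := by
  unfold dicB dicA PySem.Dict.ofList PySem.Dict.update
  simp only [List.foldl_map]

lemma digB_eq_digA : digB = digA := by
  funext i
  simp [digA, digB, dicB_eq_dicA]

-- Digit characters, as lists (all digit strings are one character long).
def dstr (i : Int) : List Char := (digA i).toList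

-- The items of A's digit map, written out as three mapped ranges.
def itemsSpec : List (Int × String) :=
  ((PySem.List.pyRange 0 26 1).map fun i => (i, String.ofList [Char.ofNat (97 + i).toNat]))
  ++ ((PySem.List.pyRange 0 26 1).map fun i => (26 + i, String.ofList [Char.ofNat (65 + i).toNat]))
  ++ ((PySem.List.pyRange 0 10 1).map fun i => (52 + i, PySem.Int.toStr i))

lemma itemsA : dicA.items = itemsSpec := by
  unfold dicA itemsSpec
  rw [PySem.Dict.items_foldl_insert_fresh (PySem.List.pyRange 0 10 1) (fun i => 52 + i)
        (fun i => PySem.Int.toStr i) _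
        (by
          intro a ha
          rw [Bool.eq_false_iff, Ne, PySem.Dict.contains_iff_mem_keys,
              PySem.Dict.keys_foldl_insert_key, PySem.Dict.keys_foldl_insert_key,
              PySem.Dict.keys_empty]
          rw [PySem.List.mem_pyRange_one] at ha
          intro hmem
          simp only [PySem.Set.mem_update, List.mem_map,
            PySem.List.mem_pyRange_one, List.not_mem_nil, false_or] at hmem
          rcases hmem with ⟨j, hj, hj2⟩ | ⟨j, hj, hj2⟩ <;> omega)
        (List.Nodup.map (fun a b h => add_left_cancel h) (PySem.List.nodup_pyRange_one 0 10))]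
  rw [PySem.Dict.items_foldl_insert_fresh (PySem.List.pyRange 0 26 1) (fun i => 26 + i)
        (fun i => String.ofList [Char.ofNat (65 + i).toNat]) _
        (by
          intro a ha
          rw [Bool.eq_false_iff, Ne, PySem.Dict.contains_iff_mem_keys,
              PySem.Dict.keys_foldl_insert_key, PySem.Dict.keys_empty]
          rw [PySem.List.mem_pyRange_one] at ha
          intro hmem
          simp only [PySem.Set.mem_update, List.mem_map,
            PySem.List.mem_pyRange_one, List.not_mem_nil, false_or] at hmem
          obtain ⟨j, hj, hj2⟩ := hmem
          omega)
        (List.Nodup.map (fun a b h => add_left_cancel h) (PySem.List.nodup_pyRange_one 0 26))]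
  rw [PySem.Dict.items_foldl_insert_fresh (PySem.List.pyRange 0 26 1) (fun i => i)
        (fun i => String.ofList [Char.ofNat (97 + i).toNat]) PySem.Dict.empty
        (by intro a _; simp)
        (by simpa using PySem.List.nodup_pyRange_one 0 26)]
  simp [List.append_assoc, PySem.Dict.empty]

lemma nodupKeysA : dicA.keys.Nodup := by
  unfold dicA
  refine PySem.Dict.nodup_keys_foldl_insert_key _ (fun i => 52 + i) _ _ ?_
  refine PySem.Dict.nodup_keys_foldl_insert_key _ (fun i => 26 + i) _ _ ?_
  refine PySem.Dict.nodup_keys_foldl_insert_key _ (fun i => i) _ _ ?_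
  exact PySem.Dict.nodup_keys_empty

lemma digA_of_mem (n : Int) (v : String) (hm : (n, v) ∈ dicA.items) : digA n = v := by
  have h := PySem.Dict.get?_of_mem_items dicA hm nodupKeysA
  simp [digA, h]

lemma digA_low (n : Int) (h0 : 0 ≤ n) (h26 : n < 26) :
    digA n = String.ofList [Char.ofNat (97 + n).toNat] := by
  refine digA_of_mem n _ ?_
  rw [itemsA]
  unfold itemsSpec
  refine List.mem_append_left _ (List.mem_append_left _ ?_)
  exact List.mem_map.mpr ⟨n, PySem.List.mem_pyRange_one.mpr ⟨h0, h26⟩, rfl⟩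

lemma digA_mid (n : Int) (h0 : 26 ≤ n) (h52 : n < 52) :
    digA n = String.ofList [Char.ofNat (65 + (n - 26)).toNat] := by
  refine digA_of_mem n _ ?_
  rw [itemsA]
  unfold itemsSpec
  refine List.mem_append_left _ (List.mem_append_right _ ?_)
  refine List.mem_map.mpr ⟨n - 26, PySem.List.mem_pyRange_one.mpr ⟨by omega, by omega⟩, ?_⟩
  have : 26 + (n - 26) = n := by omega
  rw [this]

lemma digA_high (n : Int) (h0 : 52 ≤ n) (h62 : n < 62) :
    digA n = PySem.Int.toStr (n - 52) := by
  refine digA_of_mem n _ ?_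
  rw [itemsA]
  unfold itemsSpec
  refine List.mem_append_right _ ?_
  refine List.mem_map.mpr ⟨n - 52, PySem.List.mem_pyRange_one.mpr ⟨by omega, by omega⟩, ?_⟩
  have : 52 + (n - 52) = n := by omega
  rw [this]

lemma dstr_char (n : Int) (h0 : 0 ≤ n) (h62 : n < 62) : ∃ c, dstr n = [c] := by
  unfold dstr
  by_cases h26 : n < 26
  · exact ⟨_, by rw [digA_low n h0 h26, String.toList_ofList]⟩
  · by_cases h52 : n < 52
    · exact ⟨_, by rw [digA_mid n (by omega) h52, String.toList_ofList]⟩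
    · rw [digA_high n (by omega) h62, PySem.Int.toList_toStr]
      rw [← List.length_eq_one_iff]
      have hlo : (52 : Int) ≤ n := by omega
      interval_cases n <;> decide

lemma dstr_small (n : Int) (h0 : 0 ≤ n) (h62 : n < 62) : (dstr n).reverse = dstr n := by
  obtain ⟨c, hc⟩ := dstr_char n h0 h62
  rw [hc, List.reverse_singleton]

-- The k+1 most-significant-first base-62 digit strings of n (top digit n / 62^k first).
def digitsK (k : Nat) (n : Int) : List Char :=
  match k with
  | 0 => dstr n
  | k + 1 => dstr (PySem.Int.floordiv n (62 ^ (k + 1)))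
      ++ digitsK k (PySem.Int.mod n (62 ^ (k + 1)))

-- A's remainder list, least-significant-first (what loopA appends after st).
def la (n : Int) : List Char :=
  if _h : 62 ≤ n then dstr (PySem.Int.mod n 62) ++ la (PySem.Int.floordiv n 62) else dstr n
termination_by n.toNat
decreasing_by
  simp only [PySem.Int.floordiv_eq_ediv_of_pos (by norm_num : (0:Int) < 62)]
  omega

lemma loopA_eq (fuel : Nat) (n : Int) (st : String) (hf : n.toNat < fuel) :
    (loopA fuel n st).toList = st.toList ++ la n := by
  induction fuel generalizing n st with
  | zero => omega
  | succ fuel ih =>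
    rw [loopA]
    by_cases h : 62 ≤ n
    · rw [if_pos h, la, dif_pos h]
      have hdiv : PySem.Int.floordiv n 62 = n / 62 :=
        PySem.Int.floordiv_eq_ediv_of_pos (by norm_num)
      rw [ih _ _ (by rw [hdiv]; omega)]
      simp [dstr, List.append_assoc]
    · rw [if_neg h, la, dif_neg h]
      simp [dstr]

lemma nat_div_step (m k : Nat) : m / 62 ^ (k + 2) = m / 62 / 62 ^ (k + 1) := by
  rw [Nat.div_div_eq_div_mul, ← pow_succ']

lemma nat_moddiv_step (m k : Nat) : m % 62 ^ (k + 2) / 62 = m / 62 % 62 ^ (k + 1) := by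
  have : (62 : Nat) ^ (k + 2) = 62 * 62 ^ (k + 1) := by rw [pow_succ']
  rw [this, Nat.mod_mul_right_div_self]

lemma nat_modmod_step (m k : Nat) : m % 62 ^ (k + 2) % 62 = m % 62 := by
  exact Nat.mod_mod_of_dvd m ⟨62 ^ (k + 1), by rw [pow_succ']⟩

lemma digitsK_step (k : Nat) (n : Int) (hn : 0 ≤ n) :
    digitsK (k + 1) n = digitsK k (PySem.Int.floordiv n 62) ++ dstr (PySem.Int.mod n 62) := by
  induction k generalizing n with
  | zero => norm_num [digitsK]
  | succ k ih =>
    obtain ⟨m, rfl⟩ := Int.eq_ofNat_of_zero_le hn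
    have c1 : ((62 : Int) ^ (k + 2)) = ((62 ^ (k + 2) : Nat) : Int) := by push_cast; ring
    have c2 : ((62 : Int) ^ (k + 1)) = ((62 ^ (k + 1) : Nat) : Int) := by push_cast; ring
    have c62 : ((62 : Int)) = ((62 : Nat) : Int) := by norm_num
    calc digitsK (k + 2) (m : Int)
        = dstr (PySem.Int.floordiv (m : Int) (62 ^ (k + 2)))
            ++ digitsK (k + 1) (PySem.Int.mod (m : Int) (62 ^ (k + 2))) := rfl
      _ = dstr (PySem.Int.floordiv (m : Int) (62 ^ (k + 2)))
            ++ (digitsK k (PySem.Int.floordiv (PySem.Int.mod (m : Int) (62 ^ (k + 2))) 62)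
                ++ dstr (PySem.Int.mod (PySem.Int.mod (m : Int) (62 ^ (k + 2))) 62)) := by
          rw [ih _ (PySem.Int.mod_nonneg _ (by positivity))]
      _ = digitsK (k + 1) (PySem.Int.floordiv (m : Int) 62) ++ dstr (PySem.Int.mod (m : Int) 62) := by
          show _ = (dstr (PySem.Int.floordiv (PySem.Int.floordiv (m : Int) 62) (62 ^ (k + 1)))
            ++ digitsK k (PySem.Int.mod (PySem.Int.floordiv (m : Int) 62) (62 ^ (k + 1)))) ++ _
          rw [c1, c2, c62]
          rw [PySem.Int.floordiv_natCast, PySem.Int.mod_natCast, PySem.Int.floordiv_natCast,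
              PySem.Int.floordiv_natCast, PySem.Int.mod_natCast, PySem.Int.mod_natCast,
              PySem.Int.floordiv_natCast, PySem.Int.mod_natCast]
          rw [nat_div_step, nat_moddiv_step, nat_modmod_step]
          simp [List.append_assoc]

lemma la_reverse (k : Nat) (n : Int) (hn : 0 ≤ n) (hub : n < 62 ^ (k + 1))
    (hlb : 62 ^ k ≤ n ∨ k = 0) : (la n).reverse = digitsK k n := by
  induction k generalizing n with
  | zero =>
    have h62 : ¬ (62 ≤ n) := by rw [pow_one] at hub; omega
    rw [la, dif_neg h62]
    exact dstr_small n hn (by rw [pow_one] at hub; omega)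
  | succ k ih =>
    have hpow : (62 : Int) ^ (k + 1) ≤ n := by
      rcases hlb with h | h
      · exact h
      · exact absurd h (Nat.succ_ne_zero k)
    have h62 : 62 ≤ n := le_trans (le_self_pow₀ (by norm_num) (Nat.succ_ne_zero k)) hpow
    rw [la, dif_pos h62, List.reverse_append]
    have hq : (62 : Int) ^ k ≤ PySem.Int.floordiv n 62 := by
      rw [PySem.Int.le_floordiv_iff_mul_le (by norm_num)]
      calc (62 : Int) ^ k * 62 = 62 ^ (k + 1) := by ring
        _ ≤ n := hpow
    have hq' : PySem.Int.floordiv n 62 < 62 ^ (k + 1) := by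
      rw [PySem.Int.floordiv_lt_iff_lt_mul (by norm_num)]
      calc n < 62 ^ (k + 2) := hub
        _ = 62 ^ (k + 1) * 62 := by ring
    rw [ih (PySem.Int.floordiv n 62) (by omega) hq' (Or.inl hq),
        dstr_small _ (PySem.Int.mod_nonneg _ (by norm_num)) (PySem.Int.mod_lt _ (by norm_num)),
        ← digitsK_step k n hn]

lemma loopB_eq (k fuel : Nat) (n : Int) (st : String) (hn : 0 ≤ n)
    (hf : ((62 : Int) ^ k).toNat < fuel) :
    (loopB fuel n (62 ^ k) st).toList = st.toList ++ digitsK k n := by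
  induction k generalizing n st fuel with
  | zero =>
    obtain ⟨fuel, rfl⟩ : ∃ f, fuel = f + 1 := ⟨fuel - 1, by simp at hf; omega⟩
    rw [pow_zero, loopB, if_pos one_pos]
    have e1 : PySem.Int.mod n 1 = 0 := by
      rw [PySem.Int.mod_eq_emod_of_pos (by norm_num)]; exact Int.emod_one n
    have e2 : PySem.Int.floordiv (1 : Int) 62 = 0 := by
      rw [PySem.Int.floordiv_eq_ediv_of_pos (by norm_num)]; decide
    have e3 : PySem.Int.floordiv n 1 = n := by
      rw [PySem.Int.floordiv_eq_ediv_of_pos (by norm_num)]; exact Int.ediv_one n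
    have e4 : ∀ st' : String, loopB fuel (0 : Int) (0 : Int) st' = st' := by
      intro st'; cases fuel <;> simp [loopB]
    rw [e1, e2, e3, e4]
    simp [digB_eq_digA, digitsK, dstr]
  | succ k ih =>
    obtain ⟨fuel, rfl⟩ : ∃ f, fuel = f + 1 := ⟨fuel - 1, by omega⟩
    rw [loopB, if_pos (by positivity)]
    have e1 : PySem.Int.floordiv ((62 : Int) ^ (k + 1)) 62 = 62 ^ k := by
      rw [PySem.Int.floordiv_eq_ediv_of_pos (by norm_num), pow_succ]
      exact Int.mul_ediv_cancel _ (by norm_num)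
    have hfk : ((62 : Int) ^ k).toNat < fuel := by
      have h1 : (62 : Int) ^ k < 62 ^ (k + 1) := by
        have := pow_lt_pow_right₀ (show (1:Int) < 62 by norm_num) (Nat.lt_succ_self k)
        exact this
      have h2 : (0 : Int) < 62 ^ k := by positivity
      omega
    rw [e1, ih _ _ _ (PySem.Int.mod_nonneg _ (by positivity)) hfk]
    simp [digB_eq_digA, digitsK, dstr, List.append_assoc]

lemma powB_spec (fuel : Nat) (n p : Int) (hp : 0 < p) (hpn : p ≤ n)
    (hf : (n - p).toNat < fuel) :
    ∃ j : Nat, powB fuel n p = p * 62 ^ j ∧ powB fuel n p ≤ n ∧ n < powB fuel n p * 62 := by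
  induction fuel generalizing p with
  | zero => omega
  | succ fuel ih =>
    rw [powB]
    by_cases hle : p * 62 ≤ n
    · obtain ⟨j, h1, h2, h3⟩ := ih (p * 62) (by positivity) hle (by omega)
      rw [if_pos hle]
      exact ⟨j + 1, by rw [h1]; ring, h2, h3⟩
    · rw [if_neg hle]
      exact ⟨0, by rw [pow_zero, mul_one], hpn, by omega⟩

-- ===== VERDICT (by name: the statement is the Claim_ definition above) =====
theorem idToShortURL_spec : Claim_equal_idToShortURL := by
  intro n _ hpre
  have hn : 0 ≤ n := hpre
  unfold Spec_idToShortURL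
  rw [idToShortURL, PySem.Str.slice?_none_none_neg_one, Option.getD_some]
  have hla : (loopA (n.toNat + 1) n "").toList = la n := by
    rw [loopA_eq _ _ _ (by omega)]; simp
  by_cases h0 : n = 0
  · subst h0
    have hla0 : la 0 = ['a'] := by
      rw [la, dif_neg (by norm_num)]
      unfold dstr
      rw [digA_low 0 le_rfl (by norm_num), String.toList_ofList]
      decide
    rw [idToShortURL_alt, if_pos rfl, hla, hla0]
    decide
  · obtain ⟨j, hj, hle, hlt⟩ := powB_spec (n.toNat + 1) n 1 one_pos (by omega) (by omega)
    rw [one_mul] at hj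
    rw [hj] at hle hlt
    rw [idToShortURL_alt, if_neg h0, hj, hla]
    have hkey : (la n).reverse = (loopB ((62 ^ j : Int).toNat + 1) n (62 ^ j) "").toList := by
      rw [loopB_eq j _ n "" hn (by omega)]
      simp only [String.toList_empty, List.nil_append]
      exact la_reverse j n hn (by rw [pow_succ]; omega) (Or.inl hle)
    rw [hkey, String.ofList_toList]
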